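-- pv_equiv track=rewrite | github.com/s5unanow/horadus | tools/horadus/python/horadus_workflow/task_workflow_completion_contract.py | _fallback_targeted_validation_commands
-- ===== SOURCE A (Python) =====
-- _RUNTIME_TARGETED_TEST_PREFIXES = ("src/", "alembic/")
--
-- _WORKFLOW_TARGETED_TEST_PREFIXES = ("tools/", "scripts/", ".github/workflows/", "config/")
--
-- _WORKFLOW_TARGETED_TEST_EXACT_PATHS = (
--     "Makefile",
--     ".pre-commit-config.yaml",
--     "pyproject.toml",
-- )
--
-- def _matches_path_rule(
--     paths: list[str], *, prefixes: tuple[str, ...], exact_paths: tuple[str, ...]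
-- ) -> bool:
--     return any(path.startswith(prefix) for prefix in prefixes for path in paths) or any(
--         path in exact_paths for path in paths
--     )
--
-- def _fallback_targeted_validation_commands(normalized_paths: list[str]) -> list[str]:
--     commands: list[str] = []
--     if any(
--         path.startswith(prefix)
--         for prefix in _RUNTIME_TARGETED_TEST_PREFIXES
--         for path in normalized_paths
--     ):
--         commands.append("uv run --no-sync pytest tests/unit/ -v -m unit")
--     if _matches_path_rule(
--         normalized_paths,
--         prefixes=_WORKFLOW_TARGETED_TEST_PREFIXES,
--         exact_paths=_WORKFLOW_TARGETED_TEST_EXACT_PATHS,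
--     ):
--         commands.append("uv run --no-sync pytest tests/horadus_cli/ tests/workflow/ -v -m unit")
--     return commands
-- ===== SOURCE B (Python) =====
-- _RUNTIME_TARGETED_TEST_PREFIXES = ("src/", "alembic/")
--
-- _WORKFLOW_TARGETED_TEST_PREFIXES = ("tools/", "scripts/", ".github/workflows/", "config/")
--
-- _WORKFLOW_TARGETED_TEST_EXACT_PATHS = (
--     "Makefile",
--     ".pre-commit-config.yaml",
--     "pyproject.toml",
-- )
--
--
-- def _fallback_targeted_validation_commands(normalized_paths: list[str]) -> list[str]:
--     runtime_hit = False
--     workflow_hit = False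
--     for path in normalized_paths:
--         if path.startswith(_RUNTIME_TARGETED_TEST_PREFIXES):
--             runtime_hit = True
--         if path.startswith(_WORKFLOW_TARGETED_TEST_PREFIXES) or path in _WORKFLOW_TARGETED_TEST_EXACT_PATHS:
--             workflow_hit = True
--     commands: list[str] = []
--     if runtime_hit:
--         commands.append("uv run --no-sync pytest tests/unit/ -v -m unit")
--     if workflow_hit:
--         commands.append("uv run --no-sync pytest tests/horadus_cli/ tests/workflow/ -v -m unit")
--     return commands
-- ===== Notes on version B (the rewrite author's own statement) =====
-- stated objective: faster
-- what changed: Replaced A's three separate any()-scans over the path list (two prefix-by-prefix nested generators plus an exact-path membership scan) with a single pass over the paths that maintains two boolean flags, appending the two commands after the loop.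
import Mathlib
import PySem

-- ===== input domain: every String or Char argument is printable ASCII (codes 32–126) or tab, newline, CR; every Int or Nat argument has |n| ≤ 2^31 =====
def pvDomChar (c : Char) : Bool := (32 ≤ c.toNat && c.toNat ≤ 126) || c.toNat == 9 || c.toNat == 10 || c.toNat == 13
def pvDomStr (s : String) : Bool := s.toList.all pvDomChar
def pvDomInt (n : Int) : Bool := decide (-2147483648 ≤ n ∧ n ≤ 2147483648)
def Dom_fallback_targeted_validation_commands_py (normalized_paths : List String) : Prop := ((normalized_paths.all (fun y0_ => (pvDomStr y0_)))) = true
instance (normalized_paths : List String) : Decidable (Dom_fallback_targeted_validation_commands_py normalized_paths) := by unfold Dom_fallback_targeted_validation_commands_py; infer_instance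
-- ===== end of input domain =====

-- Header: B replaces A's three separate any()-scans with one pass over the paths keeping two boolean flags (objective: simpler).

-- ===== PORT A =====
def pvRuntimePrefixes : List String := ["src/", "alembic/"]
def pvWorkflowPrefixes : List String := ["tools/", "scripts/", ".github/workflows/", "config/"]
def pvWorkflowExact : List String := ["Makefile", ".pre-commit-config.yaml", "pyproject.toml"]

def matches_path_rule_py (paths : List String) (prefixes : List String) (exact_paths : List String) : Bool :=
  prefixes.any (fun pre => paths.any (fun p => PySem.Str.startswith p pre)) ||
    paths.any (fun p => exact_paths.contains p)

def fallback_targeted_validation_commands_py (normalized_paths : List String) : List String :=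
  let commands : List String := []
  let commands :=
    if pvRuntimePrefixes.any (fun pre => normalized_paths.any (fun p => PySem.Str.startswith p pre)) then
      commands ++ ["uv run --no-sync pytest tests/unit/ -v -m unit"]
    else commands
  let commands :=
    if matches_path_rule_py normalized_paths pvWorkflowPrefixes pvWorkflowExact then
      commands ++ ["uv run --no-sync pytest tests/horadus_cli/ tests/workflow/ -v -m unit"]
    else commands
  commands

-- ===== PORT B =====
-- one pass over the paths maintaining (runtime_hit, workflow_hit); str.startswith(tuple) is the disjunction of the prefixes
def pvLoopB : List String → Bool → Bool → Bool × Bool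
  | [], r, w => (r, w)
  | p :: rest, r, w =>
      let r := if PySem.Str.startswith p "src/" || PySem.Str.startswith p "alembic/" then true else r
      let w := if (PySem.Str.startswith p "tools/" || PySem.Str.startswith p "scripts/" ||
                   PySem.Str.startswith p ".github/workflows/" || PySem.Str.startswith p "config/") ||
                  (p == "Makefile" || p == ".pre-commit-config.yaml" || p == "pyproject.toml") then true else w
      pvLoopB rest r w

def fallback_targeted_validation_commands_py_alt (normalized_paths : List String) : List String :=
  let rw := pvLoopB normalized_paths false false
  let commands : List String := []
  let commands := if rw.1 then commands ++ ["uv run --no-sync pytest tests/unit/ -v -m unit"] else commands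
  let commands := if rw.2 then commands ++ ["uv run --no-sync pytest tests/horadus_cli/ tests/workflow/ -v -m unit"] else commands
  commands

-- ===== PRECONDITION & SPEC =====
def Spec_fallback_targeted_validation_commands_py (normalized_paths : List String) (out : List String) : Prop := out = fallback_targeted_validation_commands_py_alt normalized_paths
instance (normalized_paths : List String) (out : List String) : Decidable (Spec_fallback_targeted_validation_commands_py normalized_paths out) := by unfold Spec_fallback_targeted_validation_commands_py; infer_instance

-- ===== CLAIM (what is proved, stated in full; the proofs are below) =====
def Claim_equal_fallback_targeted_validation_commands_py : Prop := ∀ (normalized_paths : List String), Dom_fallback_targeted_validation_commands_py normalized_paths → Spec_fallback_targeted_validation_commands_py normalized_paths (fallback_targeted_validation_commands_py normalized_paths)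

-- ===== LEMMAS AND PROOFS =====

-- ===== VERDICT (by name: the statement is the Claim_ definition above) =====

theorem pv_any_or (f g : String → Bool) (l : List String) :
    (l.any f || l.any g) = l.any (fun p => f p || g p) := by
  induction l with
  | nil => rfl
  | cons p t ih => simp only [List.any_cons]; rw [← ih]; cases f p <;> cases g p <;> simp

theorem pvLoopB_eq (paths : List String) (r w : Bool) :
    pvLoopB paths r w =
      (r || paths.any (fun p => PySem.Str.startswith p "src/" || PySem.Str.startswith p "alembic/"),
       w || paths.any (fun p =>
         (PySem.Str.startswith p "tools/" || PySem.Str.startswith p "scripts/" ||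
          PySem.Str.startswith p ".github/workflows/" || PySem.Str.startswith p "config/") ||
         (p == "Makefile" || p == ".pre-commit-config.yaml" || p == "pyproject.toml"))) := by
  induction paths generalizing r w with
  | nil => simp [pvLoopB]
  | cons p rest ih =>
      simp only [pvLoopB, ih, List.any_cons, Prod.mk.injEq, Bool.if_true_left,
        Bool.decide_eq_true]
      constructor <;> ac_rfl

theorem pv_any_ext (l : List String) (f g : String → Bool) (h : ∀ p, f p = g p) :
    l.any f = l.any g := by
  induction l <;> simp_all

theorem fallback_targeted_validation_commands_py_spec : Claim_equal_fallback_targeted_validation_commands_py := by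
  intro paths _
  unfold Spec_fallback_targeted_validation_commands_py
  unfold fallback_targeted_validation_commands_py fallback_targeted_validation_commands_py_alt
  rw [pvLoopB_eq]
  simp only [matches_path_rule_py, pvRuntimePrefixes, pvWorkflowPrefixes, pvWorkflowExact,
    List.any_cons, List.any_nil, Bool.false_or, Bool.or_false, pv_any_or]
  rw [pv_any_ext paths _ _ (fun p => by
    simp only [List.contains_cons, List.contains_nil, Bool.or_false]
    ac_rfl)]
  have h2 : (paths.any fun p =>
      PySem.Str.startswith p ".github/workflows/" ||
        (PySem.Str.startswith p "config/" ||
          (PySem.Str.startswith p "scripts/" ||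
            (PySem.Str.startswith p "tools/" ||
              (p == ".pre-commit-config.yaml" || (p == "Makefile" || p == "pyproject.toml")))))) =
      (paths.any fun p =>
        PySem.Str.startswith p "tools/" || PySem.Str.startswith p "scripts/" ||
            PySem.Str.startswith p ".github/workflows/" || PySem.Str.startswith p "config/" ||
          (p == "Makefile" || p == ".pre-commit-config.yaml" || p == "pyproject.toml")) :=
    pv_any_ext _ _ _ (fun p => by ac_rfl)
  rw [h2]
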